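-- pv_equiv track=rewrite | github.com/aparfenen/grna-inspector | src/grna_inspector/feature_extraction.py | _count_editing_sites
-- ===== SOURCE A (Python) =====
-- def _count_editing_sites(seq: str) -> int:
--     """Estimate number of editing sites (rough approximation)."""
--     # Count runs of non-T nucleotides as potential editing sites
--     editing_sites = 0
--     in_site = False
--     for nt in seq:
--         if nt != 'T':
--             if not in_site:
--                 editing_sites += 1
--                 in_site = True
--         else:
--             in_site = False
--     return editing_sites
-- ===== SOURCE B (Python) =====
-- def _count_editing_sites(seq: str) -> int:
--     """Estimate number of editing sites (rough approximation)."""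
--     # A run of non-T nucleotides is a connected component of the path graph on
--     # the non-T positions: #components = #vertices - #edges.
--     vertices = sum(nt != 'T' for nt in seq)
--     edges = sum(a != 'T' and b != 'T' for a, b in zip(seq, seq[1:]))
--     return vertices - edges
-- ===== Notes on version B (the rewrite author's own statement) =====
-- stated objective: alternative
-- what changed: Replaced the in_site state machine by a combinatorial identity: runs of non-T = (count of non-T characters) - (count of adjacent non-T pairs), computed in two independent counting passes (components = vertices - edges of the path graph).
import Mathlib
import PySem

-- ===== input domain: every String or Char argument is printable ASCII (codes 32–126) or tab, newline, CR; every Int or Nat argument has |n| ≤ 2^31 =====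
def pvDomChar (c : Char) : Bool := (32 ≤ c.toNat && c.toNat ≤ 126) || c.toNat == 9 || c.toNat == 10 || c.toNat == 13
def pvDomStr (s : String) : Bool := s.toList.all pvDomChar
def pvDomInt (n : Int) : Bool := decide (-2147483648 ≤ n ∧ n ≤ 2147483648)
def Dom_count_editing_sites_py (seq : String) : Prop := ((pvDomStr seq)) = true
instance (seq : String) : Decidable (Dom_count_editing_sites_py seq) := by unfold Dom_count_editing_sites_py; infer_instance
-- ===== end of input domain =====

-- B replaces A's in_site state machine by the identity: runs of non-T = #non-T chars - #adjacent non-T pairs (alternative decomposition, two counting passes).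
-- ===== PORT A =====
-- loop body of A: state = (editing_sites, in_site)
def cesStep (st : Int × Bool) (nt : Char) : Int × Bool :=
  if nt ≠ 'T' then
    (if st.2 = false then (st.1 + 1, true) else st)
  else
    (st.1, false)

def count_editing_sites_py (seq : String) : Int :=
  (seq.toList.foldl cesStep ((0 : Int), false)).1

-- ===== PORT B =====
-- vertices = sum(nt != 'T' for nt in seq); edges = sum(... for a, b in zip(seq, seq[1:]));
-- a Python sum of booleans is the count of True, ported as countP; seq[1:] is drop 1.
def count_editing_sites_py_alt (seq : String) : Int :=
  let vertices : Int := (seq.toList.countP (fun nt => nt ≠ 'T') : Nat)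
  let edges : Int := ((seq.toList.zip (seq.toList.drop 1)).countP
      (fun ab => ab.1 ≠ 'T' ∧ ab.2 ≠ 'T') : Nat)
  vertices - edges

-- ===== PRECONDITION & SPEC =====
def Spec_count_editing_sites_py (seq : String) (out : Int) : Prop := out = count_editing_sites_py_alt seq
instance (seq : String) (out : Int) : Decidable (Spec_count_editing_sites_py seq out) := by unfold Spec_count_editing_sites_py; infer_instance

-- ===== CLAIM (what is proved, stated in full; the proofs are below) =====
def Claim_equal_count_editing_sites_py : Prop := ∀ (seq : String), Dom_count_editing_sites_py seq → Spec_count_editing_sites_py seq (count_editing_sites_py seq)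

-- ===== LEMMAS AND PROOFS =====
-- Loop invariant: A's fold from state (c, p ≠ 'T') equals c plus B's vertices-minus-edges
-- count over l, where p is the character preceding l ('T' virtually at the start).
theorem ces_key (l : List Char) (c : Int) (p : Char) :
    (l.foldl cesStep (c, p != 'T')).1
    = c + ((l.countP (fun nt => nt ≠ 'T') : Nat) : Int)
        - ((((p :: l).zip l).countP (fun ab => ab.1 ≠ 'T' ∧ ab.2 ≠ 'T') : Nat) : Int) := by
  induction l generalizing c p with
  | nil => simp
  | cons nt t ih =>
    rw [List.foldl_cons]
    by_cases hnt : nt = 'T'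
    · subst hnt
      have hs : cesStep (c, p != 'T') 'T' = (c, ('T' : Char) != 'T') := by
        simp [cesStep]
      rw [hs, ih c 'T']
      simp only [List.zip_cons_cons, List.countP_cons]
      simp
    · by_cases hp : p = 'T'
      · subst hp
        have hs : cesStep (c, ('T' : Char) != 'T') nt = (c + 1, nt != 'T') := by
          simp [cesStep, hnt]
        rw [hs, ih (c + 1) nt]
        simp only [List.zip_cons_cons, List.countP_cons]
        simp [hnt]
        omega
      · have hs : cesStep (c, p != 'T') nt = (c, nt != 'T') := by
          simp only [cesStep]
          rw [show (p != 'T') = true from by simp [hp], show (nt != 'T') = true from by simp [hnt]]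
          simp [hnt]
        rw [hs, ih c nt]
        simp only [List.zip_cons_cons, List.countP_cons]
        simp [hnt, hp]
        omega

-- ===== VERDICT (by name: the statement is the Claim_ definition above) =====
theorem count_editing_sites_py_spec : Claim_equal_count_editing_sites_py := by
  intro seq _
  unfold Spec_count_editing_sites_py count_editing_sites_py count_editing_sites_py_alt
  have h := ces_key seq.toList 0 'T'
  rw [show (('T' : Char) != 'T') = false from rfl] at h
  cases hl : seq.toList with
  | nil => simp
  | cons a t =>
    rw [hl] at h
    rw [h]
    simp only [List.drop_one, List.tail_cons, List.zip_cons_cons, List.countP_cons]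
    simp
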